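-- pv_equiv track=rewrite | github.com/grandolf14/FamilyTreeGenerator | main.py | graph_CalcPos
-- ===== SOURCE A (Python) =====
-- def graph_CalcPos(newlineage, lineage_keys, lineage_SOKeys, y):
--     """calculates the graphical positiion of each tree member
--
--     :param newlineage: list
--         the list of generations for graphical Layout
--     :param lineage_keys: list
--         the key-list of all tree members
--     :param lineage_SOKeys: list
--          the key list of all significant others
--     :param y: y
--     :return: -> dict, dictionary with the graphical position for each tree member
--     """
--     posDict = {}
--     for index, item in enumerate(newlineage[- 1]):
--         name = item
--         xPos = (index) * 150
--
--         if name not in posDict: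
--             posDict[name] = xPos
--
--     # calculates other generation
--     for gen_index in reversed(range(len(newlineage[:-1]))):
--
--         for name in newlineage[gen_index]:
--
--             if not name.endswith("z"):
--
--                 children = []
--                 for item in newlineage[gen_index + 1]:
--                     if item.startswith(name):
--                         children.append(item)
--
--                 if len(children) <= 2:
--                     if name + "a" in children:
--                         posDict[name] = posDict[name + "a"]
--                     else:
--                         posDict[name] = posDict[name + "z"]
--                 else:
--                     minimum = min([posDict[x] for x in children if x in posDict])
--                     maximum = max([posDict[x] for x in children if x in posDict])
--                     posDict[name] = (minimum + maximum) // 2 - 75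
--
--     SOposDict = {}
--     for item in posDict:
--
--         if item + "z" in lineage_SOKeys:
--             SOposDict[item + "z"] = [posDict[item] + 150,
--                                      y + (int(len(item) - len(lineage_keys[0])) * 140 - 60)]
--
--             posDict[item] = [posDict[item],
--                              y + (int(len(item) - len(lineage_keys[0])) * 140 - 60)]
--
--         else:
--             posDict[item] = [posDict[item],
--                              y + (int(len(item) - len(lineage_keys[0])) * 140 - 60)]
--
--     for item in SOposDict:
--         posDict[item] = SOposDict[item]
--
--     return posDict
-- ===== SOURCE B (Python) =====
-- def graph_CalcPos(newlineage, lineage_keys, lineage_SOKeys, y):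
--     """Same result as A; per generation builds a prefix->children bucket dict in
--     one grouping pass over the next generation instead of rescanning it per name."""
--     pos = {}
--     for i, name in enumerate(newlineage[-1]):
--         pos.setdefault(name, i * 150)
--
--     for g in range(len(newlineage) - 2, -1, -1):
--         nxt = newlineage[g + 1]
--         lens = {len(n) for n in newlineage[g] if not n.endswith("z")}
--         buckets = {}
--         for item in nxt:
--             for l in lens:
--                 if l <= len(item):
--                     buckets.setdefault(item[:l], []).append(item)
--         for name in newlineage[g]:
--             if name.endswith("z"):
--                 continue
--             children = buckets.get(name, [])
--             if len(children) <= 2: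
--                 src = name + "a" if name + "a" in children else name + "z"
--                 pos[name] = pos[src]
--             else:
--                 xs = [pos[c] for c in children if c in pos]
--                 pos[name] = (min(xs) + max(xs)) // 2 - 75
--
--     sok = set(lineage_SOKeys)
--     out = {}
--     so = {}
--     for name, x in pos.items():
--         ypos = y + (len(name) - len(lineage_keys[0])) * 140 - 60
--         out[name] = [x, ypos]
--         if name + "z" in sok:
--             so[name + "z"] = [x + 150, ypos]
--     out.update(so)
--     return out
-- ===== Notes on version B (the rewrite author's own statement) =====
-- stated objective: alternative
-- what changed: Per generation, B builds a prefix->children bucket dict (one grouping pass over the next generation, keyed by item[:l] for each distinct non-z name length) so A's per-name rescan of the whole next generation disappears; membership in lineage_SOKeys becomes a set lookup and the final x/y conversion is a single pass building the result dict directly.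
import Mathlib
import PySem

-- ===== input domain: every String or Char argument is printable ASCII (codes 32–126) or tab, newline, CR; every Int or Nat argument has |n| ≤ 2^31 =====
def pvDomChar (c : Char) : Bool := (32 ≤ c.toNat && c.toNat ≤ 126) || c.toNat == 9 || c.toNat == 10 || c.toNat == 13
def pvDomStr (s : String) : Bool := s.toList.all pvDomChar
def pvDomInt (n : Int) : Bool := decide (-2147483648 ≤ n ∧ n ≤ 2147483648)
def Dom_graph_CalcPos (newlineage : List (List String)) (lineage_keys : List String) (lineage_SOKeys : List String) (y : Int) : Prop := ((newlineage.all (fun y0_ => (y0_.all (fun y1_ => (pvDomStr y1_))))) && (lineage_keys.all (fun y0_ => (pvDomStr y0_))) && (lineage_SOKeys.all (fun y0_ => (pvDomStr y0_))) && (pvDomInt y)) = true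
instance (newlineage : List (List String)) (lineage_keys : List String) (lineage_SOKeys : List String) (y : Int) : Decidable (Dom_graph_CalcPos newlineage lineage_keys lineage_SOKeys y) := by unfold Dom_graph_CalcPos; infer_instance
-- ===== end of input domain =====

-- B replaces A's per-name rescan of the next generation by a prefix→children bucket
-- dict built in one grouping pass per generation (objective: alternative algorithm).

-- ===== PORT A =====
def graph_CalcPos (newlineage : List (List String)) (lineage_keys : List String) (lineage_SOKeys : List String) (y : Int) : List (String × List Int) :=
  -- posDict = {}; for index, item in enumerate(newlineage[-1]): ...
  let pos0 : PySem.Dict String Int :=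
    (PySem.List.enumerate ((PySem.List.pyGet? newlineage (-1)).getD [])).foldl
      (fun d p => if d.contains p.2 then d else d.insert p.2 (p.1 * 150)) PySem.Dict.empty
  -- for gen_index in reversed(range(len(newlineage[:-1]))): ...
  let pos : PySem.Dict String Int :=
    ((PySem.List.pyRange 0 ((PySem.List.slice newlineage none (some (-1))).length : Int) 1).reverse).foldl
      (fun d g =>
        ((PySem.List.pyGet? newlineage g).getD []).foldl
          (fun d name =>
            if PySem.Str.endswith name "z" then d
            else
              let children : List String :=
                ((PySem.List.pyGet? newlineage (g + 1)).getD []).foldl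
                  (fun acc it => if PySem.Str.startswith it name then acc ++ [it] else acc) []
              if children.length ≤ 2 then
                if children.contains (name ++ "a") then
                  d.insert name (d.getD (name ++ "a") 0)
                else
                  d.insert name (d.getD (name ++ "z") 0)  -- KeyError if absent: outside Pre_
              else
                let vals : List Int :=
                  children.foldl (fun acc x => if d.contains x then acc ++ [d.getD x 0] else acc) []
                d.insert name (PySem.Int.floordiv
                  (((PySem.List.min? vals (fun v => v)).getD 0) +
                   ((PySem.List.max? vals (fun v => v)).getD 0)) 2 - 75))  -- min/max([]) = ValueError: outside Pre_
          d)
      pos0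
  -- third phase: SOposDict / rewrite of posDict values, then posDict.update(SOposDict)
  let pair :=
    pos.items.foldl
      (fun (st : PySem.Dict String (List Int) × PySem.Dict String (List Int)) p =>
        let yv : Int := y + ((PySem.Str.len p.1 - PySem.Str.len ((PySem.List.pyGet? lineage_keys 0).getD "")) * 140 - 60)
        if lineage_SOKeys.contains (p.1 ++ "z") then
          (st.1.insert p.1 [p.2, yv], st.2.insert (p.1 ++ "z") [p.2 + 150, yv])
        else
          (st.1.insert p.1 [p.2, yv], st.2))
      (PySem.Dict.empty, PySem.Dict.empty)
  (pair.2.items.foldl (fun d q => d.insert q.1 q.2) pair.1).items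

-- ===== PORT B =====
def graph_CalcPos_alt (newlineage : List (List String)) (lineage_keys : List String) (lineage_SOKeys : List String) (y : Int) : List (String × List Int) :=
  let pos0 : PySem.Dict String Int :=
    (PySem.List.enumerate ((PySem.List.pyGet? newlineage (-1)).getD [])).foldl
      (fun d p => d.setdefault p.2 (p.1 * 150)) PySem.Dict.empty
  -- for g in range(len(newlineage) - 2, -1, -1): build the prefix buckets once, then one pass over the names
  let pos : PySem.Dict String Int :=
    (PySem.List.pyRange ((newlineage.length : Int) - 2) (-1) (-1)).foldl
      (fun d g =>
        let nxt : List String := (PySem.List.pyGet? newlineage (g + 1)).getD []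
        let gen : List String := (PySem.List.pyGet? newlineage g).getD []
        let lens : PySem.Set Int :=
          PySem.Set.ofList ((gen.filter (fun nm => !(PySem.Str.endswith nm "z"))).map PySem.Str.len)
        let buckets : PySem.Dict String (List String) :=
          nxt.foldl
            (fun b it =>
              lens.foldl
                (fun b l =>
                  if l ≤ PySem.Str.len it then
                    -- buckets.setdefault(it[:l], []).append(it)
                    b.insert (PySem.Str.slice it none (some l))
                      (b.getD (PySem.Str.slice it none (some l)) [] ++ [it])
                  else b)
                b)
            PySem.Dict.empty
        gen.foldl
          (fun d name =>
            if PySem.Str.endswith name "z" then d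
            else
              let children : List String := buckets.getD name []
              if children.length ≤ 2 then
                let src : String := if children.contains (name ++ "a") then name ++ "a" else name ++ "z"
                d.insert name (d.getD src 0)
              else
                let xs : List Int := (children.filter (fun c => d.contains c)).map (fun c => d.getD c 0)
                d.insert name (PySem.Int.floordiv
                  (((PySem.List.min? xs (fun v => v)).getD 0) +
                   ((PySem.List.max? xs (fun v => v)).getD 0)) 2 - 75))
          d)
      pos0
  let sok : PySem.Set String := PySem.Set.ofList lineage_SOKeys
  let key0 : String := (PySem.List.pyGet? lineage_keys 0).getD ""
  let pair :=
    pos.items.foldl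
      (fun (st : PySem.Dict String (List Int) × PySem.Dict String (List Int)) p =>
        let yv : Int := y + (PySem.Str.len p.1 - PySem.Str.len key0) * 140 - 60
        (st.1.insert p.1 [p.2, yv],
         if sok.contains (p.1 ++ "z") then st.2.insert (p.1 ++ "z") [p.2 + 150, yv] else st.2))
      (PySem.Dict.empty, PySem.Dict.empty)
  (pair.2.items.foldl (fun d q => d.insert q.1 q.2) pair.1).items

-- ===== PRECONDITION & SPEC =====
-- Pre_ excludes exactly the inputs on which Python A raises: IndexError on empty newlineage,
-- KeyError / ValueError in the generation pass, IndexError on empty lineage_keys with a nonempty tree.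
def Pre_graph_CalcPos (newlineage : List (List String)) (lineage_keys : List String) (lineage_SOKeys : List String) (y : Int) : Prop :=
  newlineage ≠ [] ∧
  (∀ p ∈ newlineage.zip newlineage.tail, ∀ name ∈ p.1,
      PySem.Str.endswith name "z" = false →
      (if (p.2.filter (fun it => PySem.Str.startswith it name)).length ≤ 2 then
         (name ++ "a") ∈ p.2.filter (fun it => PySem.Str.startswith it name) ∨
         (name ++ "z") ∈ (newlineage.getLast?.getD [])
       else
         ∃ x ∈ p.2.filter (fun it => PySem.Str.startswith it name),
           PySem.Str.endswith x "z" = false ∨ x ∈ (newlineage.getLast?.getD []))) ∧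
  (((newlineage.getLast?.getD []) ≠ [] ∨
     ∃ gen ∈ newlineage.dropLast, ∃ name ∈ gen, PySem.Str.endswith name "z" = false) →
   lineage_keys ≠ [])
instance (newlineage : List (List String)) (lineage_keys : List String) (lineage_SOKeys : List String) (y : Int) : Decidable (Pre_graph_CalcPos newlineage lineage_keys lineage_SOKeys y) := by unfold Pre_graph_CalcPos; infer_instance

def pvWitness_graph_CalcPos : List (List String) × List String × List String × Int :=
  ([["a"], ["aa", "az"]], ["a"], ["az"], 0)

def Spec_graph_CalcPos (newlineage : List (List String)) (lineage_keys : List String) (lineage_SOKeys : List String) (y : Int) (out : List (String × List Int)) : Prop := out = graph_CalcPos_alt newlineage lineage_keys lineage_SOKeys y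
instance (newlineage : List (List String)) (lineage_keys : List String) (lineage_SOKeys : List String) (y : Int) (out : List (String × List Int)) : Decidable (Spec_graph_CalcPos newlineage lineage_keys lineage_SOKeys y out) := by unfold Spec_graph_CalcPos; infer_instance

-- ===== CLAIM (what is proved, stated in full; the proofs are below) =====
def Claim_equal_graph_CalcPos : Prop := ∀ (newlineage : List (List String)) (lineage_keys : List String) (lineage_SOKeys : List String) (y : Int), Dom_graph_CalcPos newlineage lineage_keys lineage_SOKeys y → Pre_graph_CalcPos newlineage lineage_keys lineage_SOKeys y → Spec_graph_CalcPos newlineage lineage_keys lineage_SOKeys y (graph_CalcPos newlineage lineage_keys lineage_SOKeys y)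

-- ===== LEMMAS AND PROOFS =====

theorem pv_len_ne {s t : String} (h : s.toList.length ≠ t.toList.length) : s ≠ t :=
  fun he => h (by rw [he])

theorem pv_slice_len (it : String) (l : Int) (h0 : 0 ≤ l) :
    (PySem.Str.slice it none (some l)).toList.length = min l.toNat it.toList.length := by
  rw [PySem.Str.toList_slice, PySem.Chars.slice_eq_listSlice, PySem.List.slice_to _ h0]
  simp

theorem pv_bucket_skip (it name : String) (L : List Int) (b : PySem.Dict String (List String))
    (h : ∀ l ∈ L, 0 ≤ l ∧ l ≠ PySem.Str.len name) :
    (L.foldl (fun b l =>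
        if l ≤ PySem.Str.len it then
          b.insert (PySem.Str.slice it none (some l))
            (b.getD (PySem.Str.slice it none (some l)) [] ++ [it])
        else b) b).getD name [] = b.getD name [] := by
  induction L generalizing b with
  | nil => rfl
  | cons l rest ih =>
    obtain ⟨h0, hne⟩ := h l (by simp)
    simp only [List.foldl_cons]
    rw [ih _ (fun x hx => h x (by simp [hx]))]
    split
    · rename_i hle
      rw [PySem.Dict.getD_insert_of_ne]
      apply pv_len_ne
      rw [pv_slice_len it l h0]
      rw [PySem.Str.len_eq] at hle hne
      omega
    · rfl

theorem pv_startswith_iff (it name : String) :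
    PySem.Str.startswith it name = true ↔ name.toList = it.toList.take name.toList.length := by
  rw [PySem.Str.startswith_eq, PySem.Chars.startswith_iff, List.prefix_iff_eq_take]

theorem pv_slice_eq_take (it : String) (l : Int) (h0 : 0 ≤ l) :
    (PySem.Str.slice it none (some l)).toList = it.toList.take l.toNat := by
  rw [PySem.Str.toList_slice, PySem.Chars.slice_eq_listSlice, PySem.List.slice_to _ h0]

theorem pv_bucket_hit (it name : String) (L : List Int) (b : PySem.Dict String (List String))
    (hnd : L.Nodup) (hmem : PySem.Str.len name ∈ L) (hpos : ∀ l ∈ L, 0 ≤ l) :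
    (L.foldl (fun b l =>
        if l ≤ PySem.Str.len it then
          b.insert (PySem.Str.slice it none (some l))
            (b.getD (PySem.Str.slice it none (some l)) [] ++ [it])
        else b) b).getD name []
      = b.getD name [] ++ (if PySem.Str.startswith it name then [it] else []) := by
  induction L generalizing b with
  | nil => cases hmem
  | cons l rest ih =>
    have h0 : (0:Int) ≤ l := hpos l (by simp)
    simp only [List.foldl_cons]
    by_cases hl : l = PySem.Str.len name
    · have hrest : ∀ x ∈ rest, 0 ≤ x ∧ x ≠ PySem.Str.len name := by
        intro x hx
        have hne : x ≠ PySem.Str.len name := by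
          rw [← hl]; rintro rfl; exact (List.nodup_cons.mp hnd).1 hx
        exact ⟨hpos x (by simp [hx]), hne⟩
      by_cases hle : l ≤ PySem.Str.len it
      · rw [if_pos hle]
        have hlen : l = (name.toList.length : Int) := by rw [hl, PySem.Str.len_eq]
        have hitlen : l.toNat ≤ it.toList.length := by
          rw [PySem.Str.len_eq] at hle; omega
        by_cases hk : PySem.Str.slice it none (some l) = name
        · rw [hk, pv_bucket_skip it name rest _ hrest, PySem.Dict.getD_insert_self]
          have hsw : PySem.Str.startswith it name = true := by
            have hnl : name.toList.length = l.toNat := by omega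
            rw [pv_startswith_iff, hnl, ← pv_slice_eq_take it l h0, hk]
          rw [hsw]; simp
        · rw [pv_bucket_skip it name rest _ hrest,
              PySem.Dict.getD_insert_of_ne _ _ _ (Ne.symm hk)]
          have hsw : PySem.Str.startswith it name = false := by
            rw [Bool.eq_false_iff]
            intro hsw
            apply hk
            apply String.toList_inj.mp
            have hnl : name.toList.length = l.toNat := by
              rw [PySem.Str.len_eq] at hl; omega
            rw [pv_slice_eq_take it l h0, ← hnl, ← (pv_startswith_iff it name).mp hsw]
          rw [hsw]; simp
      · rw [if_neg hle, pv_bucket_skip it name rest _ hrest]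
        have hsw : PySem.Str.startswith it name = false := by
          rw [Bool.eq_false_iff]
          intro hsw
          have := (pv_startswith_iff it name).mp hsw
          have hlen := congrArg List.length this
          rw [List.length_take] at hlen
          rw [PySem.Str.len_eq] at hle hl
          omega
        rw [hsw]; simp
    · have hb' : ∀ b' : PySem.Dict String (List String),
          ((if l ≤ PySem.Str.len it then
              b'.insert (PySem.Str.slice it none (some l))
                (b'.getD (PySem.Str.slice it none (some l)) [] ++ [it])
            else b')).getD name [] = b'.getD name [] := by
        intro b'
        split
        · rename_i hle
          rw [PySem.Dict.getD_insert_of_ne]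
          apply pv_len_ne
          rw [pv_slice_len it l h0]
          rw [PySem.Str.len_eq] at hle hl
          omega
        · rfl
      rw [ih _ (List.nodup_cons.mp hnd).2
            ((List.mem_cons.mp hmem).resolve_left (fun h => hl h.symm))
            (fun x hx => hpos x (by simp [hx])), hb']

theorem pv_range_eq (n : Nat) :
    (PySem.List.pyRange 0 ((n - 1 : Nat) : Int) 1).reverse
      = PySem.List.pyRange ((n : Int) - 2) (-1) (-1) := by
  rw [PySem.List.pyRange_one, PySem.List.pyRange_neg_one]
  have h1 : (((n - 1 : Nat) : Int) - 0).toNat = n - 1 := by omega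
  have h2 : (((n : Int) - 2) - (-1)).toNat = n - 1 := by omega
  rw [h1, h2]
  apply List.ext_getElem
  · simp
  · intro i hi1 hi2
    have hi : i < n - 1 := by simpa using hi1
    rw [List.getElem_reverse]
    simp only [List.getElem_map, List.getElem_range, List.length_map, List.length_range]
    omega

theorem pv_buckets_getD (nxt : List String) (L : PySem.Set Int) (name : String)
    (hnd : L.Nodup) (hmem : PySem.Str.len name ∈ L) (hpos : ∀ l ∈ L, 0 ≤ l)
    (b : PySem.Dict String (List String)) :
    (nxt.foldl (fun b it =>
        L.foldl (fun b l =>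
          if l ≤ PySem.Str.len it then
            b.insert (PySem.Str.slice it none (some l))
              (b.getD (PySem.Str.slice it none (some l)) [] ++ [it])
          else b) b) b).getD name []
      = b.getD name [] ++ nxt.filter (fun it => PySem.Str.startswith it name) := by
  induction nxt generalizing b with
  | nil => simp
  | cons it rest ih =>
    simp only [List.foldl_cons, List.filter_cons]
    rw [ih, pv_bucket_hit it name L b hnd hmem hpos]
    cases h : PySem.Str.startswith it name <;> simp [h]

theorem pv_gen_body_eq (gen nxt : List String) (d : PySem.Dict String Int) :
    gen.foldl
      (fun d name =>
        if PySem.Str.endswith name "z" then d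
        else
          let children : List String :=
            nxt.foldl (fun acc it => if PySem.Str.startswith it name then acc ++ [it] else acc) []
          if children.length ≤ 2 then
            if children.contains (name ++ "a") then d.insert name (d.getD (name ++ "a") 0)
            else d.insert name (d.getD (name ++ "z") 0)
          else
            let vals : List Int :=
              children.foldl (fun acc x => if d.contains x then acc ++ [d.getD x 0] else acc) []
            d.insert name (PySem.Int.floordiv
              (((PySem.List.min? vals (fun v => v)).getD 0) +
               ((PySem.List.max? vals (fun v => v)).getD 0)) 2 - 75)) d
    = gen.foldl
      (fun d name =>
        if PySem.Str.endswith name "z" then d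
        else
          let children : List String :=
            (nxt.foldl
              (fun b it =>
                (PySem.Set.ofList ((gen.filter (fun nm => !(PySem.Str.endswith nm "z"))).map PySem.Str.len)).foldl
                  (fun b l =>
                    if l ≤ PySem.Str.len it then
                      b.insert (PySem.Str.slice it none (some l))
                        (b.getD (PySem.Str.slice it none (some l)) [] ++ [it])
                    else b) b)
              PySem.Dict.empty).getD name []
          if children.length ≤ 2 then
            let src : String := if children.contains (name ++ "a") then name ++ "a" else name ++ "z"
            d.insert name (d.getD src 0)
          else
            let xs : List Int := (children.filter (fun c => d.contains c)).map (fun c => d.getD c 0)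
            d.insert name (PySem.Int.floordiv
              (((PySem.List.min? xs (fun v => v)).getD 0) +
               ((PySem.List.max? xs (fun v => v)).getD 0)) 2 - 75)) d := by
  apply PySem.List.foldl_congr_mem
  intro d name hname
  cases hz : PySem.Str.endswith name "z" with
  | true => simp only [hz, if_true]
  | false =>
    simp only [hz, Bool.false_eq_true, if_false]
    have hch :
        ((nxt.foldl
          (fun b it =>
            (PySem.Set.ofList ((gen.filter (fun nm => !(PySem.Str.endswith nm "z"))).map PySem.Str.len)).foldl
              (fun b l =>
                if l ≤ PySem.Str.len it then
                  b.insert (PySem.Str.slice it none (some l))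
                    (b.getD (PySem.Str.slice it none (some l)) [] ++ [it])
                else b) b)
          PySem.Dict.empty) : PySem.Dict String (List String)).getD name []
          = nxt.filter (fun it => PySem.Str.startswith it name) := by
      rw [pv_buckets_getD]
      · simp
      · exact PySem.Set.nodup_ofList _
      · rw [PySem.Set.mem_ofList]
        exact List.mem_map.mpr ⟨name, List.mem_filter.mpr ⟨hname, by simpa using hz⟩, rfl⟩
      · intro l hl
        rw [PySem.Set.mem_ofList] at hl
        obtain ⟨s, _, rfl⟩ := List.mem_map.mp hl
        rw [PySem.Str.len_eq]
        positivity
    simp only [hch, PySem.List.foldl_append_if_eq_filter, List.nil_append]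
    split
    · split
      · rename_i hc
        simp only [hc, if_true]
      · rename_i hc
        simp only [hc, Bool.false_eq_true, if_false]
    · have hvals :
          (nxt.filter (fun it => PySem.Str.startswith it name)).foldl
            (fun acc x => if d.contains x then acc ++ [d.getD x 0] else acc) []
          = ((nxt.filter (fun it => PySem.Str.startswith it name)).filter
              (fun c => d.contains c)).map (fun c => d.getD c 0) := by
        rw [PySem.List.foldl_append_if (fun x => d.contains x) (fun x => d.getD x 0)]
        simp
      rw [hvals]

-- proof-only restatements of the two ports' pipelines (definitionally equal to the ports)
def pvPosA (newlineage : List (List String)) : PySem.Dict String Int :=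
  ((PySem.List.pyRange 0 ((PySem.List.slice newlineage none (some (-1))).length : Int) 1).reverse).foldl
    (fun d g =>
      ((PySem.List.pyGet? newlineage g).getD []).foldl
        (fun d name =>
          if PySem.Str.endswith name "z" then d
          else
            let children : List String :=
              ((PySem.List.pyGet? newlineage (g + 1)).getD []).foldl
                (fun acc it => if PySem.Str.startswith it name then acc ++ [it] else acc) []
            if children.length ≤ 2 then
              if children.contains (name ++ "a") then
                d.insert name (d.getD (name ++ "a") 0)
              else
                d.insert name (d.getD (name ++ "z") 0)
            else
              let vals : List Int :=
                children.foldl (fun acc x => if d.contains x then acc ++ [d.getD x 0] else acc) []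
              d.insert name (PySem.Int.floordiv
                (((PySem.List.min? vals (fun v => v)).getD 0) +
                 ((PySem.List.max? vals (fun v => v)).getD 0)) 2 - 75))
        d)
    ((PySem.List.enumerate ((PySem.List.pyGet? newlineage (-1)).getD [])).foldl
      (fun d p => if d.contains p.2 then d else d.insert p.2 (p.1 * 150)) PySem.Dict.empty)

def pvPosB (newlineage : List (List String)) : PySem.Dict String Int :=
  (PySem.List.pyRange ((newlineage.length : Int) - 2) (-1) (-1)).foldl
    (fun d g =>
      let nxt : List String := (PySem.List.pyGet? newlineage (g + 1)).getD []
      let gen : List String := (PySem.List.pyGet? newlineage g).getD []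
      let lens : PySem.Set Int :=
        PySem.Set.ofList ((gen.filter (fun nm => !(PySem.Str.endswith nm "z"))).map PySem.Str.len)
      let buckets : PySem.Dict String (List String) :=
        nxt.foldl
          (fun b it =>
            lens.foldl
              (fun b l =>
                if l ≤ PySem.Str.len it then
                  b.insert (PySem.Str.slice it none (some l))
                    (b.getD (PySem.Str.slice it none (some l)) [] ++ [it])
                else b)
              b)
          PySem.Dict.empty
      gen.foldl
        (fun d name =>
          if PySem.Str.endswith name "z" then d
          else
            let children : List String := buckets.getD name []
            if children.length ≤ 2 then
              let src : String := if children.contains (name ++ "a") then name ++ "a" else name ++ "z"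
              d.insert name (d.getD src 0)
            else
              let xs : List Int := (children.filter (fun c => d.contains c)).map (fun c => d.getD c 0)
              d.insert name (PySem.Int.floordiv
                (((PySem.List.min? xs (fun v => v)).getD 0) +
                 ((PySem.List.max? xs (fun v => v)).getD 0)) 2 - 75))
        d)
    ((PySem.List.enumerate ((PySem.List.pyGet? newlineage (-1)).getD [])).foldl
      (fun d p => d.setdefault p.2 (p.1 * 150)) PySem.Dict.empty)

theorem pv_pos_eq (newlineage : List (List String)) : pvPosA newlineage = pvPosB newlineage := by
  unfold pvPosA pvPosB
  have h0 :
      (PySem.List.enumerate ((PySem.List.pyGet? newlineage (-1)).getD [])).foldl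
        (fun d p => if d.contains p.2 then d else d.insert p.2 (p.1 * 150))
        (PySem.Dict.empty : PySem.Dict String Int)
      = (PySem.List.enumerate ((PySem.List.pyGet? newlineage (-1)).getD [])).foldl
        (fun d p => d.setdefault p.2 (p.1 * 150)) PySem.Dict.empty := by
    apply PySem.List.foldl_congr_mem
    intro d p _
    cases hc : d.contains p.2 with
    | true => rw [PySem.Dict.setdefault_of_contains _ _ hc]; simp
    | false => rw [PySem.Dict.setdefault_of_not_contains _ _ hc]; simp
  rw [h0, PySem.List.slice_to_neg_one, List.length_dropLast, pv_range_eq newlineage.length]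
  apply PySem.List.foldl_congr_mem
  intro d g _
  exact pv_gen_body_eq ((PySem.List.pyGet? newlineage g).getD [])
    ((PySem.List.pyGet? newlineage (g + 1)).getD []) d

def pvPhase3A (pos : PySem.Dict String Int) (lineage_keys lineage_SOKeys : List String) (y : Int) :
    List (String × List Int) :=
  let pair :=
    pos.items.foldl
      (fun (st : PySem.Dict String (List Int) × PySem.Dict String (List Int)) p =>
        let yv : Int := y + ((PySem.Str.len p.1 - PySem.Str.len ((PySem.List.pyGet? lineage_keys 0).getD "")) * 140 - 60)
        if lineage_SOKeys.contains (p.1 ++ "z") then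
          (st.1.insert p.1 [p.2, yv], st.2.insert (p.1 ++ "z") [p.2 + 150, yv])
        else
          (st.1.insert p.1 [p.2, yv], st.2))
      (PySem.Dict.empty, PySem.Dict.empty)
  (pair.2.items.foldl (fun d q => d.insert q.1 q.2) pair.1).items

def pvPhase3B (pos : PySem.Dict String Int) (lineage_keys lineage_SOKeys : List String) (y : Int) :
    List (String × List Int) :=
  let sok : PySem.Set String := PySem.Set.ofList lineage_SOKeys
  let key0 : String := (PySem.List.pyGet? lineage_keys 0).getD ""
  let pair :=
    pos.items.foldl
      (fun (st : PySem.Dict String (List Int) × PySem.Dict String (List Int)) p =>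
        let yv : Int := y + (PySem.Str.len p.1 - PySem.Str.len key0) * 140 - 60
        (st.1.insert p.1 [p.2, yv],
         if sok.contains (p.1 ++ "z") then st.2.insert (p.1 ++ "z") [p.2 + 150, yv] else st.2))
      (PySem.Dict.empty, PySem.Dict.empty)
  (pair.2.items.foldl (fun d q => d.insert q.1 q.2) pair.1).items

theorem pv_phase3_eq (pos : PySem.Dict String Int) (lineage_keys lineage_SOKeys : List String) (y : Int) :
    pvPhase3A pos lineage_keys lineage_SOKeys y = pvPhase3B pos lineage_keys lineage_SOKeys y := by
  unfold pvPhase3A pvPhase3B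
  have hpair :
      pos.items.foldl
        (fun (st : PySem.Dict String (List Int) × PySem.Dict String (List Int)) p =>
          let yv : Int := y + ((PySem.Str.len p.1 - PySem.Str.len ((PySem.List.pyGet? lineage_keys 0).getD "")) * 140 - 60)
          if lineage_SOKeys.contains (p.1 ++ "z") then
            (st.1.insert p.1 [p.2, yv], st.2.insert (p.1 ++ "z") [p.2 + 150, yv])
          else
            (st.1.insert p.1 [p.2, yv], st.2))
        (PySem.Dict.empty, PySem.Dict.empty)
      = pos.items.foldl
        (fun (st : PySem.Dict String (List Int) × PySem.Dict String (List Int)) p =>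
          let yv : Int := y + (PySem.Str.len p.1 - PySem.Str.len ((PySem.List.pyGet? lineage_keys 0).getD "")) * 140 - 60
          (st.1.insert p.1 [p.2, yv],
           if (PySem.Set.ofList lineage_SOKeys).contains (p.1 ++ "z") then
             st.2.insert (p.1 ++ "z") [p.2 + 150, yv] else st.2))
        (PySem.Dict.empty, PySem.Dict.empty) := by
    apply PySem.List.foldl_congr_mem
    intro st p _
    have harith : y + ((PySem.Str.len p.1 - PySem.Str.len ((PySem.List.pyGet? lineage_keys 0).getD "")) * 140 - 60)
        = y + (PySem.Str.len p.1 - PySem.Str.len ((PySem.List.pyGet? lineage_keys 0).getD "")) * 140 - 60 := by ring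
    have hcont : (PySem.Set.ofList lineage_SOKeys).contains (p.1 ++ "z")
        = lineage_SOKeys.contains (p.1 ++ "z") := by
      by_cases h : (p.1 ++ "z") ∈ lineage_SOKeys <;> simp [h, PySem.Set.mem_ofList]
    dsimp only
    rw [harith, hcont]
    cases hc : lineage_SOKeys.contains (p.1 ++ "z") <;> simp
  rw [hpair]

theorem pv_ports_eq' (newlineage : List (List String)) (lineage_keys lineage_SOKeys : List String) (y : Int) :
    pvPhase3A (pvPosA newlineage) lineage_keys lineage_SOKeys y
      = pvPhase3B (pvPosB newlineage) lineage_keys lineage_SOKeys y := by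
  rw [pv_pos_eq, pv_phase3_eq]

theorem pv_ports_eq (newlineage : List (List String)) (lineage_keys : List String) (lineage_SOKeys : List String) (y : Int) :
    graph_CalcPos newlineage lineage_keys lineage_SOKeys y
      = graph_CalcPos_alt newlineage lineage_keys lineage_SOKeys y := by
  have ha : graph_CalcPos newlineage lineage_keys lineage_SOKeys y
      = pvPhase3A (pvPosA newlineage) lineage_keys lineage_SOKeys y := rfl
  have hb : graph_CalcPos_alt newlineage lineage_keys lineage_SOKeys y
      = pvPhase3B (pvPosB newlineage) lineage_keys lineage_SOKeys y := rfl
  rw [ha, hb]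
  exact pv_ports_eq' newlineage lineage_keys lineage_SOKeys y

-- ===== VERDICT (by name: the statement is the Claim_ definition above) =====
theorem graph_CalcPos_spec : Claim_equal_graph_CalcPos := by
  intro nl lk sok y _ _
  unfold Spec_graph_CalcPos
  exact pv_ports_eq nl lk sok y
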